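-- pv_equiv track=rewrite | github.com/MateusFSR/Ferramenta-de-Calculo-de-Probabilidades | teste.py | sugestao_acao
-- ===== SOURCE A (Python) =====
-- def sugestao_acao(coluna_atual, percentual_atual, percentuais):
--     if percentual_atual <= 26:
--         # Identifica outras colunas com percentuais maiores
--         outras_colunas = [(col, perc) for col, perc in percentuais.items() if col != coluna_atual and perc > percentual_atual]
--         outras_colunas.sort(key=lambda x: x[1], reverse=True)  # Ordena em ordem decrescente
--
--         if len(outras_colunas) >= 2:
--             col1, perc1 = outras_colunas[0]
--             col2, perc2 = outras_colunas[1]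
--             return f'Entrar na coluna {col1} e coluna {col2}'
--         elif len(outras_colunas) == 1:
--             col1, perc1 = outras_colunas[0]
--             return f'Entrar na coluna {col1}'
--         else:
--             return 'Nenhuma coluna com percentual maior disponível.'
--     else:
--         return 'Nenhuma ação necessária.'
-- ===== SOURCE B (Python) =====
-- def sugestao_acao(coluna_atual, percentual_atual, percentuais):
--     if percentual_atual > 26:
--         return 'Nenhuma ação necessária.'
--     # single pass: keep the best and second-best qualifying columns
--     # (strict > so the earlier-seen column wins ties, like the stable sort)
--     best = None
--     second = None
--     for col, perc in percentuais.items():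
--         if col == coluna_atual or perc <= percentual_atual:
--             continue
--         if best is None or perc > best[1]:
--             second = best
--             best = (col, perc)
--         elif second is None or perc > second[1]:
--             second = (col, perc)
--     if second is not None:
--         return f'Entrar na coluna {best[0]} e coluna {second[0]}'
--     if best is not None:
--         return f'Entrar na coluna {best[0]}'
--     return 'Nenhuma coluna com percentual maior disponível.'
-- ===== Notes on version B (the rewrite author's own statement) =====
-- stated objective: alternative
-- what changed: Replaces the filter-then-stable-sort-descending-and-take-two with a single pass that maintains the best and second-best qualifying columns, promoting only on strictly greater percentage so first-seen columns win ties.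
import Mathlib
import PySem

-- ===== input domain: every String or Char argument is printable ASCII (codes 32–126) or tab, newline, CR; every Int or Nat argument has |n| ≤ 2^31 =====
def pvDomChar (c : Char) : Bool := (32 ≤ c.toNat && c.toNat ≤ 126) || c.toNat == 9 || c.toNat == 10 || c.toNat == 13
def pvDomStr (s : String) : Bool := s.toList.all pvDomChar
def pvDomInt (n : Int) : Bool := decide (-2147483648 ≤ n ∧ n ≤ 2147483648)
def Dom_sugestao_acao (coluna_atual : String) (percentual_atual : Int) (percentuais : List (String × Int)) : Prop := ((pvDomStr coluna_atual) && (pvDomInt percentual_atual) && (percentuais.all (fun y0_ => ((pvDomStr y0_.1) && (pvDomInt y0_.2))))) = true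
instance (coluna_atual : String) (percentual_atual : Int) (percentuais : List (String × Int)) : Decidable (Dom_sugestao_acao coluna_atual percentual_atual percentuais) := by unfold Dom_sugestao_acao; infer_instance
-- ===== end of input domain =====

-- B replaces A's filter + stable descending sort with one pass keeping the best and
-- second-best qualifying columns (objective: alternative single-pass selection).

-- ===== PORT A =====
-- literal port of A: filter the other columns with larger percentage, stable sort
-- descending by percentage, then branch on how many there are (len>=2 / ==1 / 0).
def sugestao_acao (coluna_atual : String) (percentual_atual : Int) (percentuais : List (String × Int)) : String :=
  if percentual_atual ≤ 26 then
    let outras_colunas := percentuais.filter (fun p => (p.1 != coluna_atual) && decide (percentual_atual < p.2))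
    let sorted := PySem.List.sorted outras_colunas (fun x => x.2) true
    match sorted with
    | c1 :: c2 :: _ => "Entrar na coluna " ++ c1.1 ++ " e coluna " ++ c2.1
    | [c1] => "Entrar na coluna " ++ c1.1
    | [] => "Nenhuma coluna com percentual maior disponível."
  else "Nenhuma ação necessária."

-- ===== PORT B =====
-- one loop step of B: skip non-qualifying entries, otherwise promote into (best, second)
-- on strictly greater percentage (first-seen column keeps its rank on ties).
def pvStepB (coluna_atual : String) (percentual_atual : Int)
    (st : Option (String × Int) × Option (String × Int)) (p : String × Int) :
    Option (String × Int) × Option (String × Int) :=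
  if p.1 == coluna_atual || decide (p.2 ≤ percentual_atual) then st
  else
    match st with
    | (none, _) => (some p, none)
    | (some b, s) =>
      if b.2 < p.2 then (some p, some b)
      else
        match s with
        | none => (some b, some p)
        | some sc => if sc.2 < p.2 then (some b, some p) else (some b, some sc)

def sugestao_acao_alt (coluna_atual : String) (percentual_atual : Int) (percentuais : List (String × Int)) : String :=
  if 26 < percentual_atual then "Nenhuma ação necessária."
  else
    match percentuais.foldl (pvStepB coluna_atual percentual_atual) (none, none) with
    | (some b, some s) => "Entrar na coluna " ++ b.1 ++ " e coluna " ++ s.1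
    | (some b, none) => "Entrar na coluna " ++ b.1
    | (none, _) => "Nenhuma coluna com percentual maior disponível."

-- ===== PRECONDITION & SPEC =====
def Spec_sugestao_acao (coluna_atual : String) (percentual_atual : Int) (percentuais : List (String × Int)) (out : String) : Prop := out = sugestao_acao_alt coluna_atual percentual_atual percentuais
instance (coluna_atual : String) (percentual_atual : Int) (percentuais : List (String × Int)) (out : String) : Decidable (Spec_sugestao_acao coluna_atual percentual_atual percentuais out) := by unfold Spec_sugestao_acao; infer_instance

-- ===== CLAIM (what is proved, stated in full; the proofs are below) =====
def Claim_equal_sugestao_acao : Prop := ∀ (coluna_atual : String) (percentual_atual : Int) (percentuais : List (String × Int)), Dom_sugestao_acao coluna_atual percentual_atual percentuais → Spec_sugestao_acao coluna_atual percentual_atual percentuais (sugestao_acao coluna_atual percentual_atual percentuais)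

-- ===== LEMMAS AND PROOFS =====

-- the first two elements of a list, as the (best, second) state of B's loop
def pvTop2 (l : List (String × Int)) : Option (String × Int) × Option (String × Int) :=
  match l with
  | [] => (none, none)
  | [a] => (some a, none)
  | a :: b :: _ => (some a, some b)

-- B's loop body without the qualification guard
def pvCoreB (st : Option (String × Int) × Option (String × Int)) (p : String × Int) :
    Option (String × Int) × Option (String × Int) :=
  match st with
  | (none, _) => (some p, none)
  | (some b, s) =>
    if b.2 < p.2 then (some p, some b)
    else
      match s with
      | none => (some b, some p)
      | some sc => if sc.2 < p.2 then (some b, some p) else (some b, some sc)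

lemma pvTop2_insertBy (x : String × Int) (ys : List (String × Int)) :
    pvTop2 (PySem.List.insertBy (fun a b => decide (b.2 < a.2)) x ys) = pvCoreB (pvTop2 ys) x := by
  match ys with
  | [] => rfl
  | [a] =>
    simp only [PySem.List.insertBy, pvTop2, pvCoreB]
    by_cases h : a.2 < x.2 <;> simp [h]
  | a :: b :: t =>
    simp only [PySem.List.insertBy, pvTop2, pvCoreB]
    by_cases h : a.2 < x.2
    · simp [h]
    · by_cases h2 : b.2 < x.2 <;> simp [h, h2]

lemma pvTop2_foldl (L acc : List (String × Int)) :
    pvTop2 (L.foldl (fun a x => PySem.List.insertBy (fun a b => decide (b.2 < a.2)) x a) acc)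
      = L.foldl pvCoreB (pvTop2 acc) := by
  induction L generalizing acc with
  | nil => rfl
  | cons x L ih =>
    simp only [List.foldl_cons, ih, pvTop2_insertBy]

lemma pvStepB_eq (coluna_atual : String) (percentual_atual : Int)
    (st : Option (String × Int) × Option (String × Int)) (p : String × Int) :
    pvStepB coluna_atual percentual_atual st p =
      if ((p.1 != coluna_atual) && decide (percentual_atual < p.2)) then pvCoreB st p else st := by
  unfold pvStepB pvCoreB
  by_cases h1 : p.1 == coluna_atual
  · simp [h1]
    intro hc
    exact absurd (eq_of_beq h1) hc
  · by_cases h2 : p.2 ≤ percentual_atual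
    · simp [h1, h2]
    · simp [h1, h2, not_le.mp h2]
      intro hc
      exact absurd (beq_of_eq hc) (by simpa using h1)

-- ===== VERDICT (by name: the statement is the Claim_ definition above) =====

theorem sugestao_acao_spec : Claim_equal_sugestao_acao := by
  intro coluna_atual percentual_atual percentuais _
  unfold Spec_sugestao_acao sugestao_acao sugestao_acao_alt
  by_cases hpa : percentual_atual ≤ 26
  · have hpa' : ¬ 26 < percentual_atual := not_lt.mpr hpa
    simp only [hpa, hpa', if_true, if_false]
    have hfold : percentuais.foldl (pvStepB coluna_atual percentual_atual) (none, none)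
        = (percentuais.filter (fun p => (p.1 != coluna_atual) && decide (percentual_atual < p.2))).foldl pvCoreB (none, none) := by
      rw [List.foldl_filter]
      exact List.foldl_ext _ _ _ (fun st p _ => pvStepB_eq coluna_atual percentual_atual st p)
    have hsort : PySem.List.sorted
        (percentuais.filter (fun p => (p.1 != coluna_atual) && decide (percentual_atual < p.2)))
        (fun x => x.2) true
        = (percentuais.filter (fun p => (p.1 != coluna_atual) && decide (percentual_atual < p.2))).foldl
            (fun a x => PySem.List.insertBy (fun a b => decide (b.2 < a.2)) x a) [] :=
      PySem.List.sorted_rev_eq_foldl_insertBy _ _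
    have htop : percentuais.foldl (pvStepB coluna_atual percentual_atual) (none, none)
        = pvTop2 (PySem.List.sorted
            (percentuais.filter (fun p => (p.1 != coluna_atual) && decide (percentual_atual < p.2)))
            (fun x => x.2) true) := by
      rw [hsort, pvTop2_foldl, hfold]; rfl
    rw [htop]
    cases hs : PySem.List.sorted
        (percentuais.filter (fun p => (p.1 != coluna_atual) && decide (percentual_atual < p.2)))
        (fun x => x.2) true with
    | nil => rfl
    | cons c1 rest => cases rest <;> rfl
  · have hpa' : 26 < percentual_atual := not_le.mp hpa
    simp [hpa, hpa']
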